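-- pv_equiv track=rewrite | github.com/youmelo1/Transmissao_Digital-redes2GB | componentes.py | codificacao_AMI
-- ===== SOURCE A (Python) =====
-- def codificacao_AMI(bits_dados: list[int]) -> list[int]:
--     """
--     Recebe: 'bits_dados' (0s e 1s vindos da fonte).
--     Faz: Aplica AMI Bipolar (0 -> 0; 1 -> alterna +1/-1).
--     Retorna: Lista de 'simbolos_ami' (ex: [0, +1, 0, -1]).
--     """
--
--     simbolos_ami = []
--     occorrencias = 0
--
--     for bit in bits_dados:
--         if bit == 0:
--             simbolos_ami.append(0)
--         else:
--             if occorrencias % 2 == 0: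
--                 simbolos_ami.append(1)
--             else:
--                 simbolos_ami.append(-1)
--             occorrencias += 1
--
--     return simbolos_ami
-- ===== SOURCE B (Python) =====
-- def codificacao_AMI(bits_dados: list[int]) -> list[int]:
--     """
--     Recebe: 'bits_dados' (0s e 1s vindos da fonte).
--     Faz: Aplica AMI Bipolar (0 -> 0; 1 -> alterna +1/-1).
--     Retorna: Lista de 'simbolos_ami' (ex: [0, +1, 0, -1]).
--     """
--     # pass 1: prefix table of running counts of nonzero bits (inclusive)
--     counts = []
--     c = 0
--     for bit in bits_dados:
--         if bit != 0:
--             c += 1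
--         counts.append(c)
--     # pass 2: map each position through its prefix count
--     return [0 if bit == 0 else (1 if counts[i] % 2 == 1 else -1)
--             for i, bit in enumerate(bits_dados)]
-- ===== Notes on version B (the rewrite author's own statement) =====
-- stated objective: alternative
-- what changed: Replaces the single loop with an inline alternation counter by a two-pass decomposition: first materialize a prefix table of running nonzero-bit counts, then map each bit through its count's parity.
import Mathlib
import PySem

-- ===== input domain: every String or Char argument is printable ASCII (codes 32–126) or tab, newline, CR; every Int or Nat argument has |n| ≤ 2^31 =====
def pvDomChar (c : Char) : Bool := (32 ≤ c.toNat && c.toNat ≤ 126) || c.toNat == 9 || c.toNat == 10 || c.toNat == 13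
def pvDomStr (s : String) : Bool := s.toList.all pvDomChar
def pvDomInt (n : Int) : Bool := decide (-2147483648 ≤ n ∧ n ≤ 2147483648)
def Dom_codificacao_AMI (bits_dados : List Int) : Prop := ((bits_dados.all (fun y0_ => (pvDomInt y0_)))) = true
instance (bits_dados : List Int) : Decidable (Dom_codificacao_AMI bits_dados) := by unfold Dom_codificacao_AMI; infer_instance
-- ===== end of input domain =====

-- B is an alternative two-pass decomposition (prefix count table, then a map); same O(n) cost.

-- ===== PORT A =====
-- A: one loop maintaining the output list and an alternation counter 'occorrencias'.
def codificacao_AMI (bits_dados : List Int) : List Int :=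
  (bits_dados.foldl
    (fun (st : List Int × Int) bit =>
      if bit == 0 then (st.1 ++ [0], st.2)
      else if st.2 % 2 == 0 then (st.1 ++ [1], st.2 + 1)
      else (st.1 ++ [-1], st.2 + 1))
    ([], 0)).1

-- ===== PORT B =====
-- pass 1 of Source B: running counts of nonzero bits (inclusive prefix table)
def amiCounts : List Int → Int → List Int
  | [], _ => []
  | bit :: rest, c =>
      let c' := if bit ≠ 0 then c + 1 else c
      c' :: amiCounts rest c'

-- pass 2 of Source B: map each bit through its prefix count's parity
def codificacao_AMI_alt (bits_dados : List Int) : List Int :=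
  List.zipWith
    (fun bit cnt => if bit == 0 then (0 : Int) else if cnt % 2 == 1 then 1 else -1)
    bits_dados (amiCounts bits_dados 0)

-- ===== PRECONDITION & SPEC =====
def Spec_codificacao_AMI (bits_dados : List Int) (out : List Int) : Prop := out = codificacao_AMI_alt bits_dados
instance (bits_dados : List Int) (out : List Int) : Decidable (Spec_codificacao_AMI bits_dados out) := by unfold Spec_codificacao_AMI; infer_instance

-- ===== CLAIM (what is proved, stated in full; the proofs are below) =====
def Claim_equal_codificacao_AMI : Prop := ∀ (bits_dados : List Int), Dom_codificacao_AMI bits_dados → Spec_codificacao_AMI bits_dados (codificacao_AMI bits_dados)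

-- ===== LEMMAS AND PROOFS =====

-- Loop invariant: starting A's fold from (acc, occ) yields acc ++ B's symbols
-- computed from the prefix counts started at occ.
theorem ami_fold_eq (bits : List Int) :
    ∀ (acc : List Int) (occ : Int),
      (bits.foldl
        (fun (st : List Int × Int) bit =>
          if bit == 0 then (st.1 ++ [0], st.2)
          else if st.2 % 2 == 0 then (st.1 ++ [1], st.2 + 1)
          else (st.1 ++ [-1], st.2 + 1))
        (acc, occ)).1
      = acc ++ List.zipWith
          (fun bit cnt => if bit == 0 then (0 : Int) else if cnt % 2 == 1 then 1 else -1)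
          bits (amiCounts bits occ) := by
  induction bits with
  | nil => intro acc occ; simp
  | cons b rest ih =>
    intro acc occ
    by_cases hb : b = 0
    · subst hb
      simp only [List.foldl_cons, beq_self_eq_true, if_true]
      rw [ih]
      simp [amiCounts]
    · have hb' : (b == 0) = false := by simp [hb]
      by_cases ho : occ % 2 = 0
      · have ho' : (occ % 2 == 0) = true := by simp [ho]
        have h1 : ((occ + 1) % 2 == 1) = true := by simp; omega
        simp only [List.foldl_cons, hb', ho', Bool.false_eq_true, if_false, if_true]
        rw [ih]
        simp [amiCounts, hb]; omega
      · have ho' : (occ % 2 == 0) = false := by simp [ho]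
        have h1 : ((occ + 1) % 2 == 1) = false := by simp; omega
        simp only [List.foldl_cons, hb', ho', Bool.false_eq_true, if_false]
        rw [ih]
        simp [amiCounts, hb]; omega

-- ===== VERDICT (by name: the statement is the Claim_ definition above) =====
theorem codificacao_AMI_spec : Claim_equal_codificacao_AMI := by
  intro bits _
  unfold Spec_codificacao_AMI codificacao_AMI codificacao_AMI_alt
  simpa using ami_fold_eq bits [] 0
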